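-- pv_equiv track=rewrite | github.com/jinbeniyama/minor-planet-painter | minor_planet_painter/common.py | base36_to_int
-- ===== SOURCE A (Python) =====
-- def base36_to_int(s):
--     """
--     Convert a base-36 string to an integer.
--     Base-36 uses digits ``0-9`` and letters ``A-Z`` (case-insensitive) to represent
--     values from 0 to 35. For example, ``"10"`` in base-36 equals 36 in decimal.
--
--     Parameters
--     ----------
--     s : str
--         The base-36 encoded string. Case-insensitive.
--
--     Return
--     ------
--     value : int
--         The integer value corresponding to the base-36 input.
--     """
--     s = s.upper()
--     value = 0
--     for c in s:
--         if '0' <= c <= '9':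
--             digit = ord(c) - ord('0')
--         elif 'A' <= c <= 'Z':
--             digit = ord(c) - ord('A') + 10
--         else:
--             raise ValueError(f"Invalid base36 character: {c}")
--         value = value*36 + digit
--     return value
-- ===== SOURCE B (Python) =====
-- def base36_to_int(s):
--     """Positional-weight sum re-implementation: value accumulates digit * weight
--     left-to-right, with the weight 36**(n-1-i) maintained by integer division,
--     instead of Horner's value*36+digit folding."""
--     s = s.upper()
--     w = 36 ** (len(s) - 1) if s else 0
--     value = 0
--     for c in s:
--         if '0' <= c <= '9':
--             digit = ord(c) - ord('0')
--         elif 'A' <= c <= 'Z':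
--             digit = ord(c) - ord('A') + 10
--         else:
--             raise ValueError(f"Invalid base36 character: {c}")
--         value += digit * w
--         w //= 36
--     return value
-- ===== Notes on version B (the rewrite author's own statement) =====
-- stated objective: alternative
-- what changed: Replaces Horner's running value*36+digit fold with a left-to-right sum of positional weights: value += digit * w where the weight w starts at 36**(n-1) and is divided by 36 each step.
import Mathlib
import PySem

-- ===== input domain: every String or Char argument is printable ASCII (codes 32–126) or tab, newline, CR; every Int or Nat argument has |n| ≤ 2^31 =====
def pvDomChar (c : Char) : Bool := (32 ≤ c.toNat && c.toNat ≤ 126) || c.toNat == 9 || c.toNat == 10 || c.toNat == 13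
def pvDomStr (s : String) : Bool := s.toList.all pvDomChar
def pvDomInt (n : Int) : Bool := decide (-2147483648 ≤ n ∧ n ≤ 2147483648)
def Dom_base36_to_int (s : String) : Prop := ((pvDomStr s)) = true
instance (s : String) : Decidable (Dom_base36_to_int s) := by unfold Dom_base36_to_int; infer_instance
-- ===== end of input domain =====

-- B computes the base-36 value as an explicit sum of positional weights digit*36^(n-1-i)
-- instead of A's Horner fold value*36+digit; equal wherever A returns (Pre_ excludes the
-- inputs on which A raises ValueError).


-- ===== PORT A =====
-- digit of one (already uppercased) character; the final 0 branch is where Python raises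
-- ValueError — excluded by Pre_ below.  Used by both ports (both Pythons have this if-chain).
def pvDigit (c : Char) : Int :=
  if '0' ≤ c ∧ c ≤ '9' then (c.toNat : Int) - ('0'.toNat : Int)
  else if 'A' ≤ c ∧ c ≤ 'Z' then (c.toNat : Int) - ('A'.toNat : Int) + 10
  else 0

def base36_to_int (s : String) : Int :=
  (PySem.Chars.upper s.toList).foldl (fun value c => value * 36 + pvDigit c) 0

-- ===== PORT B =====
def base36_to_int_alt (s : String) : Int :=
  ((PySem.Chars.upper s.toList).foldl
    (fun (st : Int × Int) c => (st.1 + pvDigit c * st.2, PySem.Int.floordiv st.2 36))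
    (0, if PySem.Chars.upper s.toList ≠ [] then
          (36 : Int) ^ ((PySem.Chars.upper s.toList).length - 1) else 0)).1

-- ===== PRECONDITION & SPEC =====
-- Pre_ excludes exactly the inputs containing a character that is not 0-9/a-z/A-Z, on which A raises ValueError.
def Pre_base36_to_int (s : String) : Prop :=
  (s.toList.all (fun c => ('0' ≤ c && c ≤ '9') || ('a' ≤ c && c ≤ 'z') || ('A' ≤ c && c ≤ 'Z'))) = true
instance (s : String) : Decidable (Pre_base36_to_int s) := by unfold Pre_base36_to_int; infer_instance
def pvWitness_base36_to_int : String := "zZ9"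

def Spec_base36_to_int (s : String) (out : Int) : Prop := out = base36_to_int_alt s
instance (s : String) (out : Int) : Decidable (Spec_base36_to_int s out) := by unfold Spec_base36_to_int; infer_instance

-- ===== CLAIM (what is proved, stated in full; the proofs are below) =====
def Claim_equal_base36_to_int : Prop := ∀ (s : String), Dom_base36_to_int s → Pre_base36_to_int s → Spec_base36_to_int s (base36_to_int s)

-- ===== LEMMAS AND PROOFS =====

-- canonical positional value of an (uppercased) digit list
def pvW : List Char → Int
  | [] => 0
  | c :: t => pvDigit c * 36 ^ t.length + pvW t

lemma pvA_eq (l : List Char) : ∀ v : Int,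
    l.foldl (fun value c => value * 36 + pvDigit c) v = v * 36 ^ l.length + pvW l := by
  induction l with
  | nil => intro v; simp [pvW]
  | cons c t ih =>
    intro v
    simp only [List.foldl_cons, ih, pvW, List.length_cons]
    ring

-- initial weight of a digit list: 36^(len-1), 0 for the empty list
def pvWOf : List Char → Int
  | [] => 0
  | _ :: t => 36 ^ t.length

lemma pvWOf_div (l : List Char) : PySem.Int.floordiv (36 ^ l.length) 36 = pvWOf l := by
  cases l with
  | nil => decide
  | cons c t =>
    rw [PySem.Int.floordiv_eq_ediv_of_pos (by omega)]
    simp only [pvWOf, List.length_cons, pow_succ]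
    exact Int.mul_ediv_cancel _ (by omega)

lemma pvB_eq (l : List Char) : ∀ v w : Int, w = pvWOf l →
    (l.foldl (fun (st : Int × Int) c => (st.1 + pvDigit c * st.2, PySem.Int.floordiv st.2 36))
      (v, w)).1 = v + pvW l := by
  induction l with
  | nil => intro v w _; simp [pvW]
  | cons c t ih =>
    intro v w hw
    have hw' : w = 36 ^ t.length := hw
    rw [List.foldl_cons,
      ih (v + pvDigit c * w) (PySem.Int.floordiv w 36) (by rw [hw']; exact pvWOf_div t)]
    simp only [pvW, hw']
    ring

lemma pvW0_eq (l : List Char) :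
    (if l ≠ [] then (36 : Int) ^ (l.length - 1) else 0) = pvWOf l := by
  cases l <;> simp [pvWOf]

-- ===== VERDICT (by name: the statement is the Claim_ definition above) =====
theorem base36_to_int_spec : Claim_equal_base36_to_int := by
  intro s _ _
  unfold Spec_base36_to_int base36_to_int base36_to_int_alt
  rw [pvA_eq, pvW0_eq, pvB_eq _ 0 _ rfl]
  ring
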